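-- pv_equiv track=rewrite | github.com/stefantaubert/imageclef-lifelog-2019 | src/segmentation/DaysExtractionTransformer.py | extract_days
-- ===== SOURCE A (Python) =====
-- def extract_days(auto_img_paths: list):
--     chronologic_sorted = sorted(auto_img_paths)
--     # .../2018_05_03/B00001387_21I6X0_20180503_072550E.JPG
--     res = {}
--     for path in chronologic_sorted:
--         day_str = path.split('/')[-2] #2018_05_03
--         if day_str in res.keys():
--             res[day_str].append(path)
--         else:
--             res[day_str] = [path]
--
--     days = [res[k] for k in sorted(res.keys())]
--     return days
-- ===== SOURCE B (Python) =====
-- def extract_days(auto_img_paths: list):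
--     day = lambda p: p.split('/')[-2]
--     ordered = sorted(auto_img_paths, key=lambda p: (day(p), p))
--     days, cur = [], []
--     for p in ordered:
--         if cur and day(cur[0]) != day(p):
--             days.append(cur)
--             cur = []
--         cur.append(p)
--     if cur:
--         days.append(cur)
--     return days
-- ===== Notes on version B (the rewrite author's own statement) =====
-- stated objective: idiomatic
-- what changed: B replaces A's dict-membership accumulation (sort, bucket into a dict keyed by day, then re-sort the keys) by a single composite sort on (day, path) followed by a one-pass contiguous-run grouping; no dictionary is built.
import Mathlib
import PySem

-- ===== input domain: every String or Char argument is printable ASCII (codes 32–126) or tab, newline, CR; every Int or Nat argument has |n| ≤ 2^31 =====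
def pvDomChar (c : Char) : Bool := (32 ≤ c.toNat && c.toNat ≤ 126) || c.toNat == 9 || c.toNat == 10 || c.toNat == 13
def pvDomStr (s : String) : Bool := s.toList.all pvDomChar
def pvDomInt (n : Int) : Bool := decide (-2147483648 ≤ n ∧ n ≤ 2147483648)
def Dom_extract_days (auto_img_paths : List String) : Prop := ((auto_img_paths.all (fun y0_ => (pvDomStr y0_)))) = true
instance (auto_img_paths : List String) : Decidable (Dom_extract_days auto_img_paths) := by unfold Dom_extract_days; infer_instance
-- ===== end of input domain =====

-- B replaces A's dict-bucketing (sort, group into a dict by day, re-sort the keys) by one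
-- composite sort on (day, path) followed by a single contiguous-run grouping pass (idiomatic).


-- ===== PORT A =====
-- path.split('/')[-2]; the IndexError case (no '/' in the path) is excluded by Pre_ below.
def pvDay (p : String) : String :=
  (PySem.List.pyGet? ((PySem.Str.split? p "/").getD []) (-2)).getD ""

def extract_days (auto_img_paths : List String) : List (List String) :=
  let chronologic_sorted := PySem.List.sorted auto_img_paths (fun x => x)
  let res := chronologic_sorted.foldl
    (fun (res : PySem.Dict String (List String)) path =>
      let day_str := pvDay path
      if res.contains day_str then res.insert day_str (res.getD day_str [] ++ [path])
      else res.insert day_str [path])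
    PySem.Dict.empty
  (PySem.List.sorted res.keys (fun x => x)).map (fun k => res.getD k [])

-- ===== PORT B =====
-- one step of B's run-grouping loop over the (day, path)-sorted list
def pvStep (st : List (List String) × List String) (p : String) : List (List String) × List String :=
  if st.2 ≠ [] ∧ pvDay (st.2.headD "") ≠ pvDay p then (st.1 ++ [st.2], [p])
  else (st.1, st.2 ++ [p])

def extract_days_alt (auto_img_paths : List String) : List (List String) :=
  let ordered := PySem.List.sorted2 auto_img_paths pvDay (fun p => p)
  let st := ordered.foldl pvStep ([], [])
  if st.2 ≠ [] then st.1 ++ [st.2] else st.1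

-- ===== PRECONDITION & SPEC =====
-- Pre_ excludes exactly the inputs on which Python A raises IndexError:
-- a path with no '/' makes path.split('/')[-2] an out-of-range index.
def Pre_extract_days (auto_img_paths : List String) : Prop :=
  ∀ p ∈ auto_img_paths, PySem.Raise.InRange ((PySem.Str.split? p "/").getD []).length (-2)
instance (auto_img_paths : List String) : Decidable (Pre_extract_days auto_img_paths) := by unfold Pre_extract_days; infer_instance

def pvWitness_extract_days : List String :=
  ["2018_05_03/B001.JPG", "2018_05_02/B002.JPG", "2018_05_03/A000.JPG"]

def Spec_extract_days (auto_img_paths : List String) (out : List (List String)) : Prop := out = extract_days_alt auto_img_paths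
instance (auto_img_paths : List String) (out : List (List String)) : Decidable (Spec_extract_days auto_img_paths out) := by unfold Spec_extract_days; infer_instance

-- ===== CLAIM (what is proved, stated in full; the proofs are below) =====
def Claim_equal_extract_days : Prop := ∀ (auto_img_paths : List String), Dom_extract_days auto_img_paths → Pre_extract_days auto_img_paths → Spec_extract_days auto_img_paths (extract_days auto_img_paths)

-- ===== LEMMAS AND PROOFS =====

-- proof-only abbreviations
def pvCs (xs : List String) : List String := PySem.List.sorted xs (fun x => x)
def pvBlock (l : List String) (d : String) : List String := l.filter (fun p => pvDay p == d)
def pvDays (xs : List String) : List String :=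
  PySem.List.sorted (PySem.Set.ofList ((pvCs xs).map pvDay)) (fun x => x)
def pvKey' (p : String) : Lex (String × String) := toLex (pvDay p, p)
def pvFinish (st : List (List String) × List String) : List (List String) :=
  if st.2 ≠ [] then st.1 ++ [st.2] else st.1

lemma pvKey'_inj : Function.Injective pvKey' := by
  intro a b h
  have := congrArg (fun x => (ofLex x).2) h
  simpa [pvKey'] using this

-- sorted2 with keys (pvDay, id) is sorted with the lexicographic key pvKey'
lemma pv_sorted2_eq (xs : List String) :
    PySem.List.sorted2 xs pvDay (fun p => p) = PySem.List.sorted xs pvKey' := by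
  show List.foldl _ [] xs = List.foldl _ [] xs
  have hbf : (fun a b => decide (pvDay a < pvDay b) || (!decide (pvDay b < pvDay a) && decide (a < b)))
      = (fun a b => decide (pvKey' a < pvKey' b)) := by
    funext a b
    have : (pvKey' a < pvKey' b) ↔ (pvDay a < pvDay b ∨ (¬ pvDay b < pvDay a ∧ a < b)) := by
      rw [pvKey', pvKey', Prod.Lex.lt_iff]
      constructor
      · rintro (h | ⟨he, h2⟩)
        · exact Or.inl h
        · exact Or.inr ⟨by simp_all, by simpa using h2⟩
      · rintro (h | ⟨hn, h2⟩)
        · exact Or.inl h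
        · rcases lt_trichotomy (pvDay a) (pvDay b) with h' | h' | h'
          · exact Or.inl h'
          · exact Or.inr ⟨h', by simpa using h2⟩
          · exact absurd h' hn
    simp [this]
    rw [show (!decide ((pvDay b).toList < (pvDay a).toList))
        = decide ((pvDay a).toList ≤ (pvDay b).toList) from by
      simp [← decide_not, not_lt]]
  rw [if_neg (by decide), if_neg (by decide), hbf]

-- inserting one element's singleton into its (unique) block is a cons up to permutation
lemma pv_flat_insert (f : String → List String) (p : String) :
    ∀ D : List String, D.Nodup → pvDay p ∈ D →
      (D.flatMap (fun d => if pvDay p == d then p :: f d else f d)).Perm (p :: D.flatMap f) := by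
  intro D
  induction D with
  | nil => intro _ h; cases h
  | cons d D ih =>
    intro hnd hmem
    rw [List.flatMap_cons, List.flatMap_cons]
    by_cases h : pvDay p = d
    · have hrest : D.flatMap (fun d => if pvDay p == d then p :: f d else f d) = D.flatMap f := by
        apply List.flatMap_congr
        intro d' hd'
        have : pvDay p ≠ d' := by
          intro he; exact (List.nodup_cons.mp hnd).1 (h ▸ he ▸ hd')
        simp [this]
      rw [hrest, if_pos (by simp [h])]
      exact List.Perm.refl _
    · have hmem' : pvDay p ∈ D := by
        rcases hmem with _ | hm
        · exact absurd rfl h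
        · assumption
      have hih := ih (List.nodup_cons.mp hnd).2 hmem'
      rw [if_neg (by simp [h])]
      exact (List.Perm.append_left (f d) hih).trans List.perm_middle

-- concatenating the blocks of the distinct days is a permutation of the list
lemma pv_flat_perm :
    ∀ (l D : List String), D.Nodup → (∀ p ∈ l, pvDay p ∈ D) →
      (D.flatMap (pvBlock l)).Perm l := by
  intro l
  induction l with
  | nil => intro D _ _; simp [pvBlock]
  | cons p l ih =>
    intro D hnd hmem
    have hblk : ∀ d, pvBlock (p :: l) d = if pvDay p == d then p :: pvBlock l d else pvBlock l d := by
      intro d; simp [pvBlock, List.filter_cons]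
    have h1 : D.flatMap (pvBlock (p :: l))
        = D.flatMap (fun d => if pvDay p == d then p :: pvBlock l d else pvBlock l d) := by
      apply List.flatMap_congr; intro d _; exact hblk d
    rw [h1]
    exact (pv_flat_insert _ p D hnd (hmem p (by simp))).trans
      ((ih D hnd (fun q hq => hmem q (by simp [hq]))).cons p)

-- the concatenation of the blocks is pairwise ≤ under the lexicographic key
-- membership and key facts about blocks
lemma pv_block_key (l : List String) (d : String) : ∀ x ∈ pvBlock l d, pvDay x = d := by
  intro x hx
  have := (List.mem_filter.mp hx).2
  simpa using this

lemma pv_days_block_ne (xs : List String) : ∀ d ∈ pvDays xs, pvBlock (pvCs xs) d ≠ [] := by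
  intro d hd
  have : d ∈ (pvCs xs).map pvDay := by
    have := (PySem.List.mem_sorted _ _ _ d).mp hd
    exact (PySem.Set.mem_ofList _ d).mp this
  rcases List.mem_map.mp this with ⟨p, hp, hpd⟩
  have : p ∈ pvBlock (pvCs xs) d := List.mem_filter.mpr ⟨hp, by simp [hpd]⟩
  exact List.ne_nil_of_mem this

lemma pv_days_nodup (xs : List String) : (pvDays xs).Nodup :=
  ((PySem.List.sorted_perm _ _ _).nodup_iff).mpr (PySem.Set.nodup_ofList _)

lemma pv_days_pairwise (xs : List String) : (pvDays xs).Pairwise (· < ·) :=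
  PySem.List.sorted_ofList_pairwise_lt _

lemma pv_block_pairwise (xs : List String) (d : String) :
    (pvBlock (pvCs xs) d).Pairwise (fun a b => pvKey' a ≤ pvKey' b) := by
  have hcs : (pvCs xs).Pairwise (fun a b => a ≤ b) := PySem.List.sorted_pairwise xs (fun x => x)
  refine (hcs.filter _).imp_of_mem ?_
  intro a b ha hb hab
  have hka : pvDay a = d := pv_block_key _ d a ha
  have hkb : pvDay b = d := pv_block_key _ d b hb
  rw [pvKey', pvKey', Prod.Lex.le_iff]
  exact Or.inr ⟨by simp [hka, hkb], by simpa using hab⟩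

lemma pv_cat_pairwise (xs : List String) :
    ((pvDays xs).flatMap (pvBlock (pvCs xs))).Pairwise (fun a b => pvKey' a ≤ pvKey' b) := by
  rw [List.flatMap_def]
  rw [List.pairwise_flatten]
  constructor
  · intro l hl
    rcases List.mem_map.mp hl with ⟨d, _, rfl⟩
    exact pv_block_pairwise xs d
  · rw [List.pairwise_map]
    refine (pv_days_pairwise xs).imp ?_
    intro d d' hdd' x hx y hy
    have hkx : pvDay x = d := pv_block_key _ d x hx
    have hky : pvDay y = d' := pv_block_key _ d' y hy
    refine le_of_lt ?_
    rw [pvKey', pvKey', Prod.Lex.lt_iff]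
    exact Or.inl (by simpa [hkx, hky] using hdd')

-- the (day, path)-sorted list is exactly the blocks of the sorted days, concatenated
lemma pv_sorted_eq_cat (xs : List String) :
    PySem.List.sorted xs pvKey' = (pvDays xs).flatMap (pvBlock (pvCs xs)) := by
  have hmemD : ∀ p ∈ pvCs xs, pvDay p ∈ pvDays xs := by
    intro p hp
    exact (PySem.List.mem_sorted _ _ _ _).mpr
      ((PySem.Set.mem_ofList _ _).mpr (List.mem_map.mpr ⟨p, hp, rfl⟩))
  have hperm : (PySem.List.sorted xs pvKey').Perm ((pvDays xs).flatMap (pvBlock (pvCs xs))) := by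
    refine (PySem.List.sorted_perm xs pvKey' false).trans ?_
    refine ((pv_flat_perm (pvCs xs) (pvDays xs) (pv_days_nodup xs) hmemD).trans
      (PySem.List.sorted_perm xs (fun x => x) false)).symm
  exact PySem.List.eq_of_perm_of_pairwise_le_of_injective pvKey' pvKey'_inj hperm
    (PySem.List.sorted_pairwise xs pvKey') (pv_cat_pairwise xs)

lemma pv_fold_same (d : String) :
    ∀ (b : List String) (days : List (List String)) (cur : List String),
      (∀ x ∈ cur, pvDay x = d) → (∀ x ∈ b, pvDay x = d) →
      List.foldl pvStep (days, cur) b = (days, cur ++ b) := by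
  intro b
  induction b with
  | nil => intro days cur _ _; simp
  | cons x b ih =>
    intro days cur hcur hb
    have hstep : pvStep (days, cur) x = (days, cur ++ [x]) := by
      rcases hcs : cur with _ | ⟨c, cur'⟩
      · simp [pvStep]
      · have hc : pvDay c = d := hcur c (by simp [hcs])
        have hx : pvDay x = d := hb x (by simp)
        simp [pvStep, hc, hx]
    rw [List.foldl_cons, hstep, ih days (cur ++ [x])
      (by intro y hy; rcases List.mem_append.mp hy with h | h
          · exact hcur y h
          · simp at h; rw [h]; exact hb x (by simp))
      (fun y hy => hb y (by simp [hy]))]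
    simp

lemma pv_fold_flush (d : String) (b : List String) (days : List (List String)) (cur : List String)
    (hb : b ≠ []) (hbd : ∀ x ∈ b, pvDay x = d) (hcur : cur ≠ [])
    (hne : pvDay (cur.headD "") ≠ d) :
    List.foldl pvStep (days, cur) b = (days ++ [cur], b) := by
  rcases b with _ | ⟨x, b'⟩
  · exact absurd rfl hb
  have hx : pvDay x = d := hbd x (by simp)
  have hstep : pvStep (days, cur) x = (days ++ [cur], [x]) := by
    have hc : (days, cur).2 ≠ [] ∧ pvDay ((days, cur).2.headD "") ≠ pvDay x :=
      ⟨hcur, by rw [hx]; exact hne⟩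
    simp only [pvStep, if_pos hc]
  rw [List.foldl_cons, hstep,
    pv_fold_same d b' (days ++ [cur]) [x] (by intro y hy; simp at hy; rw [hy]; exact hx)
      (fun y hy => hbd y (by simp [hy]))]
  simp

lemma pv_fold_main (f : String → List String) :
    ∀ (D : List String) (days : List (List String)) (cur : List String) (d0 : String),
      cur ≠ [] → (∀ x ∈ cur, pvDay x = d0) →
      (d0 :: D).Pairwise (· ≠ ·) →
      (∀ d ∈ D, f d ≠ [] ∧ ∀ x ∈ f d, pvDay x = d) →
      pvFinish (List.foldl pvStep (days, cur) (D.flatMap f)) = days ++ [cur] ++ D.map f := by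
  intro D
  induction D with
  | nil => intro days cur d0 hcur _ _ _; simp [pvFinish, hcur]
  | cons d D ih =>
    intro days cur d0 hcur hcurd hpw hf
    rw [List.flatMap_cons, List.foldl_append]
    have hhead : pvDay (cur.headD "") = d0 := by
      rcases cur with _ | ⟨c, cur'⟩
      · exact absurd rfl hcur
      · exact hcurd c (by simp)
    have hne : pvDay (cur.headD "") ≠ d := by
      rw [hhead]; exact List.rel_of_pairwise_cons hpw (by simp)
    rw [pv_fold_flush d (f d) days cur (hf d (by simp)).1 (hf d (by simp)).2 hcur hne]
    rw [ih (days ++ [cur]) (f d) d (hf d (by simp)).1 (hf d (by simp)).2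
      (List.Pairwise.of_cons hpw) (fun d' hd' => hf d' (by simp [hd']))]
    simp

-- B computes the blocks of the sorted days
lemma pv_B_eq (xs : List String) :
    extract_days_alt xs = (pvDays xs).map (pvBlock (pvCs xs)) := by
  have hbody : extract_days_alt xs
      = pvFinish (List.foldl pvStep ([], []) (PySem.List.sorted2 xs pvDay (fun p => p))) := rfl
  rw [hbody, pv_sorted2_eq, pv_sorted_eq_cat]
  rcases hD : pvDays xs with _ | ⟨d, D'⟩
  · simp [pvFinish]
  · have hdmem : ∀ d' ∈ pvDays xs, pvBlock (pvCs xs) d' ≠ [] ∧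
        ∀ x ∈ pvBlock (pvCs xs) d', pvDay x = d' := by
      intro d' hd'
      exact ⟨pv_days_block_ne xs d' hd', pv_block_key _ d'⟩
    have hd : d ∈ pvDays xs := by rw [hD]; simp
    rw [List.flatMap_cons, List.foldl_append,
      pv_fold_same d (pvBlock (pvCs xs) d) [] [] (by simp) (pv_block_key _ d)]
    have hpw : (d :: D').Pairwise (fun a b => a ≠ b) := by
      have := pv_days_pairwise xs
      rw [hD] at this
      exact this.imp (fun h => ne_of_lt h)
    rw [show (([] : List (List String)), [] ++ pvBlock (pvCs xs) d)
        = (([] : List (List String)), pvBlock (pvCs xs) d) from by simp]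
    rw [pv_fold_main (pvBlock (pvCs xs)) D' [] (pvBlock (pvCs xs) d) d
      (hdmem d hd).1 (hdmem d hd).2 hpw
      (fun d' hd' => hdmem d' (by rw [hD]; simp [hd']))]
    simp

-- A computes the blocks of the sorted days
lemma pv_A_eq (xs : List String) :
    extract_days xs = (pvDays xs).map (pvBlock (pvCs xs)) := by
  have hstep : (fun (res : PySem.Dict String (List String)) path =>
      let day_str := pvDay path
      if res.contains day_str then res.insert day_str (res.getD day_str [] ++ [path])
      else res.insert day_str [path])
      = (fun (res : PySem.Dict String (List String)) path =>
          res.modify (pvDay path) [] (fun v => v ++ [path])) := by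
    funext res path
    by_cases h : res.contains (pvDay path)
    · simp [PySem.Dict.modify, h]
    · have hnone : res.get? (pvDay path) = none :=
        (PySem.Dict.get?_eq_none_iff_contains res (pvDay path)).mpr (by simpa using h)
      have hgetD : res.getD (pvDay path) [] = [] := by
        simp [PySem.Dict.getD, hnone]
      simp [PySem.Dict.modify, h, hgetD]
  have hbody : extract_days xs
      = (PySem.List.sorted
            ((pvCs xs).foldl (fun (res : PySem.Dict String (List String)) path =>
              res.modify (pvDay path) [] (fun v => v ++ [path])) PySem.Dict.empty).keys
            (fun x => x)).map
          (fun k => ((pvCs xs).foldl (fun (res : PySem.Dict String (List String)) path =>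
              res.modify (pvDay path) [] (fun v => v ++ [path])) PySem.Dict.empty).getD k []) := by
    rw [extract_days, hstep]
    rfl
  rw [hbody]
  have hkeys : ((pvCs xs).foldl (fun (res : PySem.Dict String (List String)) path =>
      res.modify (pvDay path) [] (fun v => v ++ [path])) PySem.Dict.empty).keys
      = PySem.Set.ofList ((pvCs xs).map pvDay) := by
    rw [PySem.Dict.keys_foldl_modify_key (pvCs xs) pvDay []
      (fun _ path => fun v => v ++ [path]) PySem.Dict.empty]
    rw [PySem.Set.ofList_eq_foldl]
    rfl
  have hgetD : ∀ k, ((pvCs xs).foldl (fun (res : PySem.Dict String (List String)) path =>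
      res.modify (pvDay path) [] (fun v => v ++ [path])) PySem.Dict.empty).getD k []
      = pvBlock (pvCs xs) k := by
    intro k
    have hmap : (pvCs xs).foldl (fun (res : PySem.Dict String (List String)) path =>
        res.modify (pvDay path) [] (fun v => v ++ [path])) PySem.Dict.empty
        = ((pvCs xs).map (fun p => (pvDay p, p))).foldl
            (fun (res : PySem.Dict String (List String)) q =>
              res.modify q.1 [] (fun v => v ++ [q.2])) PySem.Dict.empty := by
      rw [List.foldl_map]
    rw [hmap, PySem.Dict.getD_foldl_modify_append]
    simp [pvBlock, List.filter_map, Function.comp_def]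
  rw [hkeys]
  exact List.map_congr_left (fun k _ => hgetD k)

-- ===== VERDICT (by name: the statement is the Claim_ definition above) =====
theorem extract_days_spec : Claim_equal_extract_days := by
  intro xs _ _
  unfold Spec_extract_days
  rw [pv_A_eq, pv_B_eq]
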